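-- pv_equiv track=rewrite | github.com/ihsnokn/CentralizedSecureInstantMessaging | message.py | getTextFromBlocks
-- ===== SOURCE A (Python) =====
-- SYMBOLS = 'ABCDEFGHIJKLMNOPQRSTUVWXYZabcdefghijklmnopqrstuvwxyz1234567890 \'*/(),?;.:'
--
-- def getTextFromBlocks(blockInts, messageLength, blockSize):
--     # Converts a list of block integers to the original message string.
--     # The original message length is needed to properly convert the last
--     # block integer.
--     messageToBeSent = []
--     for blockInt in blockInts:
--         blockMessage = []
--         for i in range(blockSize - 1, -1, -1):
--             if len(messageToBeSent) + i < messageLength: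
--                 # Decode the message string for the 128 (or whatever
--                 # blockSize is set to) characters from this block integer:
--                 charIndex = blockInt // (len(SYMBOLS) ** i)
--                 blockInt = blockInt % (len(SYMBOLS) ** i)
--                 blockMessage.insert(0, SYMBOLS[charIndex])
--         messageToBeSent.extend(blockMessage)
--     return ''.join(messageToBeSent)
-- ===== SOURCE B (Python) =====
-- SYMBOLS = 'ABCDEFGHIJKLMNOPQRSTUVWXYZabcdefghijklmnopqrstuvwxyz1234567890 \'*/(),?;.:'
--
-- def getTextFromBlocks(blockInts, messageLength, blockSize):
--     # Decode each block by repeated divmod with the small base len(SYMBOLS),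
--     # extracting characters low digit first; the number of characters taken
--     # from a block is how much of the message remains, capped at blockSize.
--     base = len(SYMBOLS)
--     chars = []
--     offset = 0
--     for b in blockInts:
--         count = min(blockSize, messageLength - offset)
--         for _ in range(max(0, count)):
--             b, d = divmod(b, base)
--             chars.append(SYMBOLS[d])
--             offset += 1
--     return ''.join(chars)
-- ===== Notes on version B (the rewrite author's own statement) =====
-- stated objective: faster
-- what changed: Replaces A's per-character big-integer floordiv/mod by recomputed powers len(SYMBOLS)**i (high digit first, insert at front) with a single low-to-high pass of divmod by the small constant base, taking min(blockSize, messageLength-offset) characters per block.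
import Mathlib
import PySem

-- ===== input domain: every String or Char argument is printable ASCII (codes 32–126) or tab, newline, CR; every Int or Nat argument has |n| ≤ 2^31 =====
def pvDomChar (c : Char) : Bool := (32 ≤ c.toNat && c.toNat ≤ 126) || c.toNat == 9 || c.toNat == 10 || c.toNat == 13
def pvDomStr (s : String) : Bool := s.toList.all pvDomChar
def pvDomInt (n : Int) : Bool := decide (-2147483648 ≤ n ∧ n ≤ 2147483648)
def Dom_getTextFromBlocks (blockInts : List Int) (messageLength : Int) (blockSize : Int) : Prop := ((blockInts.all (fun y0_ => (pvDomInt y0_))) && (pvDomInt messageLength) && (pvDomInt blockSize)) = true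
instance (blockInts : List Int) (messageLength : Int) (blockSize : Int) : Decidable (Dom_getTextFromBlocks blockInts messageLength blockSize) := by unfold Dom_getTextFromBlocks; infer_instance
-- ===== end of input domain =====

-- B replaces A's per-character big-int floordiv/mod by recomputed powers 73**i with one
-- low-to-high divmod pass by the small base (faster; same return value wherever A returns).

-- ===== PORT A =====
def pvSymbols : List Char :=
  "ABCDEFGHIJKLMNOPQRSTUVWXYZabcdefghijklmnopqrstuvwxyz1234567890 '*/(),?;.:".toList

-- one iteration of A's inner `for i in range(blockSize-1, -1, -1)` loop; state = (blockMessage, blockInt)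
def pvStepA (L messageLength : Int) (st : List Char × Int) (i : Int) : List Char × Int :=
  if L + i < messageLength then
    let p : Int := (73 : Int) ^ i.toNat   -- len(SYMBOLS) ** i; i ≥ 0 throughout this range
    let charIndex := PySem.Int.floordiv st.2 p
    let rest := PySem.Int.mod st.2 p
    match PySem.List.pyGet? pvSymbols charIndex with
    | some c => (c :: st.1, rest)          -- blockMessage.insert(0, SYMBOLS[charIndex])
    | none => (st.1, rest)                 -- IndexError in Python; excluded by Pre_
  else st

def getTextFromBlocks (blockInts : List Int) (messageLength : Int) (blockSize : Int) : String :=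
  let messageToBeSent := blockInts.foldl (fun (acc : List Char) blockInt =>
    acc ++ ((PySem.List.pyRange (blockSize - 1) (-1) (-1)).foldl
      (pvStepA (acc.length : Int) messageLength) ([], blockInt)).1) []
  String.ofList messageToBeSent

-- ===== PORT B =====
-- `for _ in range(max(0, count)): b, d = divmod(b, 73); chars.append(SYMBOLS[d])`
def pvAltChunk : Nat → Int → List Char
  | 0, _ => []
  | n+1, b =>
    let d := PySem.Int.mod b 73
    let q := PySem.Int.floordiv b 73
    match PySem.List.pyGet? pvSymbols d with
    | some c => c :: pvAltChunk n q
    | none => pvAltChunk n q               -- unreachable: 0 ≤ d < 73 = len(SYMBOLS)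

def getTextFromBlocks_alt (blockInts : List Int) (messageLength : Int) (blockSize : Int) : String :=
  let st := blockInts.foldl (fun (st : List Char × Int) b =>
    (st.1 ++ pvAltChunk (max 0 (min blockSize (messageLength - st.2))).toNat b,
      st.2 + max 0 (min blockSize (messageLength - st.2))))
    ([], 0)
  String.ofList st.1

-- ===== PRECONDITION & SPEC =====
-- number of characters decoded from block k: min(blockSize, messageLength - offset_k) clamped at 0,
-- where offset_k = number of characters produced by blocks 0..k-1 (closed form)
def pvBlockCap (messageLength blockSize : Int) (k : Nat) : Nat :=
  (max 0 (min blockSize (messageLength - max 0 (min (max messageLength 0) ((k : Int) * blockSize))))).toNat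

-- Pre_ excludes exactly the inputs on which A raises IndexError: a block integer outside
-- [-(73^c), 73^c) for its character count c makes A's top charIndex leave SYMBOLS' index range.
def Pre_getTextFromBlocks (blockInts : List Int) (messageLength : Int) (blockSize : Int) : Prop :=
  ∀ p ∈ blockInts.zipIdx, pvBlockCap messageLength blockSize p.2 = 0 ∨
    (-((73 : Int) ^ pvBlockCap messageLength blockSize p.2) ≤ p.1 ∧
      p.1 < (73 : Int) ^ pvBlockCap messageLength blockSize p.2)

instance (blockInts : List Int) (messageLength : Int) (blockSize : Int) : Decidable (Pre_getTextFromBlocks blockInts messageLength blockSize) := by unfold Pre_getTextFromBlocks; infer_instance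

def pvWitness_getTextFromBlocks : List Int × Int × Int := ([500, 30], 5, 3)

def Spec_getTextFromBlocks (blockInts : List Int) (messageLength : Int) (blockSize : Int) (out : String) : Prop := out = getTextFromBlocks_alt blockInts messageLength blockSize
instance (blockInts : List Int) (messageLength : Int) (blockSize : Int) (out : String) : Decidable (Spec_getTextFromBlocks blockInts messageLength blockSize out) := by unfold Spec_getTextFromBlocks; infer_instance

-- ===== CLAIM (what is proved, stated in full; the proofs are below) =====
def Claim_equal_getTextFromBlocks : Prop := ∀ (blockInts : List Int) (messageLength : Int) (blockSize : Int), Dom_getTextFromBlocks blockInts messageLength blockSize → Pre_getTextFromBlocks blockInts messageLength blockSize → Spec_getTextFromBlocks blockInts messageLength blockSize (getTextFromBlocks blockInts messageLength blockSize)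


-- ===== LEMMAS AND PROOFS =====

-- reference digit list: c base-73 digits of b, low digit first, via ediv/emod
def pvRefC : Nat → Int → List Char
  | 0, _ => []
  | n+1, b => pvSymbols.getD ((b % 73).toNat) 'A' :: pvRefC n (b / 73)

lemma pvSymbols_length : pvSymbols.length = 73 := by decide

lemma pvGetD_some (n : Nat) (h : n < pvSymbols.length) :
    pvSymbols[n]? = some (pvSymbols.getD n 'A') := by
  rw [List.getD_eq_getElem?_getD, List.getElem?_eq_getElem h]
  rfl

lemma pvGetSome (i : Int) (h1 : -73 ≤ i) (h2 : i < 73) :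
    PySem.List.pyGet? pvSymbols i = some (pvSymbols.getD (i % 73).toNat 'A') := by
  rcases (by omega : 0 ≤ i ∨ i < 0) with h | h
  · rw [PySem.List.pyGet?_of_nonneg _ h]
    have h3 : (i % 73).toNat = i.toNat := by omega
    rw [h3]
    exact pvGetD_some i.toNat (by rw [pvSymbols_length]; omega)
  · have hk : i = -(((-i).toNat : Int)) := by omega
    have hg : PySem.List.pyGet? pvSymbols i = pvSymbols[pvSymbols.length - (-i).toNat]? := by
      conv_lhs => rw [hk]
      exact PySem.List.pyGet?_neg_natCast pvSymbols (-i).toNat (by omega)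
        (by rw [pvSymbols_length]; omega)
    have hidx : pvSymbols.length - (-i).toNat = (i % 73).toNat := by
      rw [pvSymbols_length]; omega
    rw [hg, hidx]
    exact pvGetD_some _ (by rw [pvSymbols_length]; omega)

lemma pvAltChunk_eq_ref : ∀ (n : Nat) (b : Int), pvAltChunk n b = pvRefC n b := by
  intro n
  induction n with
  | zero => intro b; rfl
  | succ n ih =>
    intro b
    have hmod : PySem.Int.mod b 73 = b % 73 := PySem.Int.mod_eq_emod_of_pos (by norm_num)
    have hdiv : PySem.Int.floordiv b 73 = b / 73 := PySem.Int.floordiv_eq_ediv_of_pos (by norm_num)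
    have hg := pvGetSome (b % 73) (by omega) (by omega)
    have h73 : b % 73 % 73 = b % 73 := by omega
    rw [h73] at hg
    simp only [pvAltChunk, hmod, hdiv, hg, pvRefC, ih]

lemma pvRefC_length : ∀ (n : Nat) (b : Int), (pvRefC n b).length = n := by
  intro n
  induction n with
  | zero => intro b; rfl
  | succ n ih => intro b; simp [pvRefC, ih]

lemma pvEmodDiv (b m : Int) (hm : 0 < m) : b % (73 * m) / 73 = b / 73 % m := by
  have hne : (73 * m) ≠ 0 := by positivity
  have hr0 : 0 ≤ b % (73 * m) := Int.emod_nonneg b hne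
  have hr1 : b % (73 * m) < 73 * m := Int.emod_lt_of_pos b (by positivity)
  have hsplit : b = b % (73 * m) + (m * (b / (73 * m))) * 73 := by
    have := Int.mul_ediv_add_emod b (73 * m)
    ring_nf
    ring_nf at this
    omega
  have hdiv : b / 73 = b % (73 * m) / 73 + m * (b / (73 * m)) := by
    conv_lhs => rw [hsplit]
    exact Int.add_mul_ediv_right _ _ (by norm_num)
  have hq0 : 0 ≤ b % (73 * m) / 73 := Int.ediv_nonneg hr0 (by norm_num)
  have hq1 : b % (73 * m) / 73 < m := by
    rw [Int.ediv_lt_iff_lt_mul (by norm_num)]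
    omega
  rw [hdiv, Int.add_mul_emod_self_left, Int.emod_eq_of_lt hq0 hq1]

lemma pvRefC_snoc : ∀ (n : Nat) (b : Int), -((73:Int)^(n+1)) ≤ b → b < (73:Int)^(n+1) →
    pvRefC (n+1) b = pvRefC n (b % (73:Int)^n) ++
      [pvSymbols.getD ((b / (73:Int)^n % 73).toNat) 'A'] := by
  intro n
  induction n with
  | zero =>
    intro b h1 h2
    simp [pvRefC]
  | succ n ih =>
    intro b h1 h2
    have hp : (0:Int) < 73 ^ (n+1) := by positivity
    have epow : ((73:Int) ^ (n+1)) * 73 = 73 ^ (n+1+1) := by ring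
    have hb1 : -((73:Int)^(n+1)) ≤ b / 73 := by
      rw [Int.le_ediv_iff_mul_le (by norm_num)]
      have : -((73:Int)^(n+1)) * 73 = -(73 ^ (n+1+1)) := by rw [← epow]; ring
      omega
    have hb2 : b / 73 < (73:Int)^(n+1) := by
      rw [Int.ediv_lt_iff_lt_mul (by norm_num)]
      omega
    have e1 : b % (73:Int) ^ (n+1) % 73 = b % 73 :=
      Int.emod_emod_of_dvd b (dvd_pow_self 73 (Nat.succ_ne_zero n))
    have e2 : b % (73:Int) ^ (n+1) / 73 = b / 73 % 73 ^ n := by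
      rw [pow_succ']
      exact pvEmodDiv b (73 ^ n) (by positivity)
    have e3 : b / 73 / (73:Int) ^ n = b / 73 ^ (n+1) := by
      have e4 : b / 73 / (73:Int) ^ n = b / ((73:Int) * 73 ^ n) := by
        exact Int.ediv_ediv_of_nonneg (by norm_num)
      rw [e4, ← pow_succ']
    have lhs : pvRefC (n+1+1) b =
        pvSymbols.getD ((b % 73).toNat) 'A' :: pvRefC (n+1) (b / 73) := rfl
    rw [lhs, ih (b / 73) hb1 hb2, e3]
    have rhs : pvRefC (n+1) (b % (73:Int) ^ (n+1)) =
        pvSymbols.getD ((b % (73:Int) ^ (n+1) % 73).toNat) 'A' ::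
          pvRefC n (b % (73:Int) ^ (n+1) / 73) := rfl
    rw [rhs, e1, e2]
    simp

lemma pvStepA_shift (L mL : Int) (i : Int) (bm : List Char) (b : Int) :
    pvStepA L mL (bm, b) i =
      ((pvStepA L mL ([], b) i).1 ++ bm, (pvStepA L mL ([], b) i).2) := by
  simp only [pvStepA]
  split_ifs with h
  · generalize PySem.List.pyGet? pvSymbols (PySem.Int.floordiv b ((73:Int) ^ i.toNat)) = o
    cases o <;> rfl
  · rfl

lemma pvShift (is : List Int) (L mL : Int) : ∀ (bm : List Char) (b : Int),
    is.foldl (pvStepA L mL) (bm, b) =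
      ((is.foldl (pvStepA L mL) ([], b)).1 ++ bm, (is.foldl (pvStepA L mL) ([], b)).2) := by
  induction is with
  | nil => intro bm b; simp
  | cons i is ih =>
    intro bm b
    simp only [List.foldl_cons]
    rw [pvStepA_shift]
    rcases hst : pvStepA L mL ([], b) i with ⟨X1, X2⟩
    rw [ih (X1 ++ bm) X2, ih X1 X2]
    simp

-- A's inner loop over range(n-1, -1, -1) produces the reference digit list of length c
lemma pvInner : ∀ (n : Nat) (L mL b : Int),
    ((max 0 (min (n:Int) (mL - L))).toNat = 0 ∨
      (-((73:Int)^(max 0 (min (n:Int) (mL - L))).toNat) ≤ b ∧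
        b < (73:Int)^(max 0 (min (n:Int) (mL - L))).toNat)) →
    ((PySem.List.pyRange ((n:Int) - 1) (-1) (-1)).foldl (pvStepA L mL) ([], b)).1 =
      pvRefC (max 0 (min (n:Int) (mL - L))).toNat b := by
  intro n
  induction n with
  | zero =>
    intro L mL b _
    have hc : (max 0 (min ((0:Nat):Int) (mL - L))).toNat = 0 := by omega
    rw [PySem.List.pyRange_neg_one_eq_nil (by norm_num), hc]
    rfl
  | succ n ih =>
    intro L mL b hb
    have hcons : PySem.List.pyRange (((n+1:Nat):Int) - 1) (-1) (-1) =
        ((n:Nat):Int) :: PySem.List.pyRange (((n:Nat):Int) - 1) (-1) (-1) := by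
      have e : (((n+1:Nat):Int) - 1) = ((n:Nat):Int) := by push_cast; ring
      rw [e, PySem.List.pyRange_neg_one_cons (by omega)]
    rw [hcons]
    simp only [List.foldl_cons]
    by_cases h : L + ((n:Nat):Int) < mL
    · -- this block still has characters to emit: c = n+1, the step decodes the top digit
      have hc : (max 0 (min ((n+1:Nat):Int) (mL - L))).toNat = n + 1 := by push_cast; omega
      rw [hc] at hb
      rcases hb with hb | hb
      · omega
      have hp : (0:Int) < 73 ^ n := by positivity
      have epow : ((73:Int) ^ n) * 73 = 73 ^ (n+1) := by rw [pow_succ]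
      have hq1 : -73 ≤ b / (73:Int) ^ n := by
        rw [Int.le_ediv_iff_mul_le hp]
        have : (-73:Int) * 73 ^ n = -(73 ^ n * 73) := by ring
        omega
      have hq2 : b / (73:Int) ^ n < 73 := by
        rw [Int.ediv_lt_iff_lt_mul hp]
        omega
      have hstep : pvStepA L mL ([], b) ((n:Nat):Int) =
          ([pvSymbols.getD ((b / (73:Int) ^ n % 73).toNat) 'A'], b % (73:Int) ^ n) := by
        unfold pvStepA
        rw [if_pos h]
        have ht : (((n:Nat):Int)).toNat = n := by omega
        have hfd : PySem.Int.floordiv b ((73:Int) ^ (((n:Nat):Int)).toNat) = b / (73:Int) ^ n := by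
          rw [ht]; exact PySem.Int.floordiv_eq_ediv_of_pos hp
        have hmd : PySem.Int.mod b ((73:Int) ^ (((n:Nat):Int)).toNat) = b % (73:Int) ^ n := by
          rw [ht]; exact PySem.Int.mod_eq_emod_of_pos hp
        simp only [hfd, hmd, pvGetSome _ hq1 hq2]
      rw [hstep, pvShift]
      have hr0 : 0 ≤ b % (73:Int) ^ n := Int.emod_nonneg b (by positivity)
      have hr1 : b % (73:Int) ^ n < 73 ^ n := Int.emod_lt_of_pos b hp
      have hcn : (max 0 (min ((n:Nat):Int) (mL - L))).toNat = n := by push_cast; omega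
      have hih := ih L mL (b % (73:Int) ^ n) (by rw [hcn]; right; constructor <;> omega)
      rw [hcn] at hih
      rw [hih, hc]
      exact (pvRefC_snoc n b hb.1 hb.2).symm
    · -- the message is exhausted at this index: the step is a no-op and c is unchanged
      have hstep : pvStepA L mL ([], b) ((n:Nat):Int) = ([], b) := by
        unfold pvStepA; rw [if_neg h]
      have hc : (max 0 (min ((n+1:Nat):Int) (mL - L))).toNat =
          (max 0 (min ((n:Nat):Int) (mL - L))).toNat := by push_cast; omega
      rw [hstep, hc]
      exact ih L mL b (by rw [← hc]; rw [hc]; exact (hc ▸ hb))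

-- closed-form offsets: Ω(k+1) = Ω(k) + clamp(min blockSize (mL − Ω(k)))
lemma pvOmega_step (mL bS : Int) (k : Nat) :
    max 0 (min (max mL 0) ((((k+1):Nat):Int) * bS)) =
      max 0 (min (max mL 0) (((k:Nat):Int) * bS)) +
        max 0 (min bS (mL - max 0 (min (max mL 0) (((k:Nat):Int) * bS)))) := by
  have h1 : (((k+1):Nat):Int) * bS = ((k:Nat):Int) * bS + bS := by push_cast; ring
  have h2 : 0 ≤ bS → 0 ≤ ((k:Nat):Int) * bS :=
    fun h => mul_nonneg (by positivity) h
  have h3 : bS ≤ 0 → ((k:Nat):Int) * bS ≤ 0 :=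
    fun h => mul_nonpos_of_nonneg_of_nonpos (by positivity) h
  rw [h1]
  generalize ((k:Nat):Int) * bS = x at h2 h3 ⊢
  omega

lemma pvMain : ∀ (bis : List Int) (mL bS : Int) (k : Nat) (acc : List Char),
    (acc.length : Int) = max 0 (min (max mL 0) (((k:Nat):Int) * bS)) →
    (∀ p ∈ bis.zipIdx k, pvBlockCap mL bS p.2 = 0 ∨
      (-((73:Int) ^ pvBlockCap mL bS p.2) ≤ p.1 ∧ p.1 < (73:Int) ^ pvBlockCap mL bS p.2)) →
    bis.foldl (fun (acc : List Char) blockInt =>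
        acc ++ ((PySem.List.pyRange (bS - 1) (-1) (-1)).foldl
          (pvStepA (acc.length : Int) mL) ([], blockInt)).1) acc =
      (bis.foldl (fun (st : List Char × Int) b =>
        (st.1 ++ pvAltChunk (max 0 (min bS (mL - st.2))).toNat b,
          st.2 + max 0 (min bS (mL - st.2)))) (acc, (acc.length : Int))).1 := by
  intro bis
  induction bis with
  | nil => intro mL bS k acc _ _; rfl
  | cons b bis ih =>
    intro mL bS k acc hoff hpre
    simp only [List.foldl_cons]
    have hpre0 := hpre (b, k) (by rw [List.zipIdx_cons]; exact List.mem_cons_self)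
    have hcap : pvBlockCap mL bS k = (max 0 (min bS (mL - (acc.length : Int)))).toNat := by
      unfold pvBlockCap; rw [hoff]
    rw [hcap] at hpre0
    have hinner : ((PySem.List.pyRange (bS - 1) (-1) (-1)).foldl
        (pvStepA (acc.length : Int) mL) ([], b)).1 =
        pvRefC (max 0 (min bS (mL - (acc.length : Int)))).toNat b := by
      rcases (by omega : bS ≤ 0 ∨ 0 < bS) with hbs | hbs
      · have hnil : PySem.List.pyRange (bS - 1) (-1) (-1) = [] :=
          PySem.List.pyRange_neg_one_eq_nil (by omega)
        have hc : (max 0 (min bS (mL - (acc.length : Int)))).toNat = 0 := by omega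
        rw [hnil, hc]; rfl
      · have hn : ((bS.toNat : Nat):Int) = bS := Int.toNat_of_nonneg (by omega)
        have := pvInner bS.toNat (acc.length : Int) mL b (by rw [hn]; exact hpre0)
        rw [hn] at this
        exact this
    have hchunk : pvAltChunk (max 0 (min bS (mL - (acc.length : Int)))).toNat b =
        pvRefC (max 0 (min bS (mL - (acc.length : Int)))).toNat b := pvAltChunk_eq_ref _ _
    rw [hinner, hchunk]
    set c := (max 0 (min bS (mL - (acc.length : Int)))).toNat with hcdef
    have hlen : ((acc ++ pvRefC c b).length : Int) =
        max 0 (min (max mL 0) ((((k+1):Nat):Int) * bS)) := by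
      rw [pvOmega_step mL bS k, ← hoff]
      have hc0 : ((c:Nat):Int) = max 0 (min bS (mL - (acc.length : Int))) := by
        rw [hcdef]; omega
      simp only [List.length_append, pvRefC_length]
      push_cast
      omega
    have hsnd : (acc.length : Int) + max 0 (min bS (mL - (acc.length : Int))) =
        ((acc ++ pvRefC c b).length : Int) := by
      simp only [List.length_append, pvRefC_length]
      omega
    rw [hsnd]
    exact ih mL bS (k+1) (acc ++ pvRefC c b) hlen
      (fun p hp => hpre p (by rw [List.zipIdx_cons]; exact List.mem_cons_of_mem _ hp))

-- ===== VERDICT (by name: the statement is the Claim_ definition above) =====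
theorem getTextFromBlocks_spec : Claim_equal_getTextFromBlocks := by
  intro bis mL bS _ hpre
  unfold Spec_getTextFromBlocks getTextFromBlocks getTextFromBlocks_alt
  have h := pvMain bis mL bS 0 [] (by norm_num)
    (by intro p hp; exact hpre p hp)
  simp only [List.length_nil, Nat.cast_zero] at h
  exact congrArg String.ofList h
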